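-- pv_equiv track=rewrite | github.com/tomasvanagas/prime-research | experiments/wildcard/dynamical_prime_orbit.py | prime_residue_periods
-- ===== SOURCE A (Python) =====
-- def prime_residue_periods(primes, max_m=50):
--     """For each m, check if the sequence p(n) mod m is eventually periodic."""
--     results = {}
--     for m in range(2, max_m + 1):
--         seq = [p % m for p in primes]
--         n = len(seq)
--
--         # Check for period: try all periods up to n/3
--         best_period = None
--         for period in range(1, n // 3):
--             # Check if seq[start:] has this period (after some transient)
--             for start in range(0, min(50, n - 3 * period)):
--                 ok = True
--                 for i in range(start + period, min(start + 3 * period, n)):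
--                     if seq[i] != seq[i - period]:
--                         ok = False
--                         break
--                 if ok:
--                     best_period = (period, start)
--                     break
--             if best_period is not None:
--                 break
--
--         results[m] = best_period
--
--     return results
-- ===== SOURCE B (Python) =====
-- def prime_residue_periods(primes, max_m=50):
--     """Start-major search: for each start take its smallest valid period, then
--     return the lexicographic minimum of those (period, start) pairs."""
--     n = len(primes)
--     results = {}
--     for m in range(2, max_m + 1):
--         seq = [p % m for p in primes]
--         mins = []
--         for s in range(min(50, n - 3)):
--             pm = next((p for p in range(1, n // 3)
--                        if s + 3 * p < n and seq[s] == seq[s + p]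
--                        and seq[s:s + 2 * p] == seq[s + p:s + 3 * p]), None)
--             if pm is not None:
--                 mins.append((pm, s))
--         results[m] = min(mins, default=None)
--     return results
-- ===== Notes on version B (the rewrite author's own statement) =====
-- stated objective: alternative
-- what changed: A searches period-major with three nested break-loops and an element-by-element window check; B traverses start-major, taking for each start its first valid period via a slice comparison, and returns the lexicographic minimum of those (period, start) pairs - a different traversal order proved to yield A's first-period/first-start answer.
import Mathlib
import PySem

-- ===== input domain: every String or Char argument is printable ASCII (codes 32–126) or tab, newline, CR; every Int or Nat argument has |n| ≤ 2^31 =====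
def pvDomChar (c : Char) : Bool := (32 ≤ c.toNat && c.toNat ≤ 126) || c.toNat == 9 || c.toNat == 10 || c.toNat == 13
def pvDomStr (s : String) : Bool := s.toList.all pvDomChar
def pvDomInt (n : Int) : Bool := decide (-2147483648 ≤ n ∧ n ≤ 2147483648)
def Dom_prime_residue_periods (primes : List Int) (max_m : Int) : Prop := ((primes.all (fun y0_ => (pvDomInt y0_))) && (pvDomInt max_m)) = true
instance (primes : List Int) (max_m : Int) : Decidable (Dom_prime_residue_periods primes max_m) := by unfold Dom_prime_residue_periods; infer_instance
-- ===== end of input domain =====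

-- B replaces A's period-major nested break loops by a start-major traversal (first valid period
-- per start, then one lexicographic minimum) - a different traversal order, same exact result.

-- ===== PORT A =====
def prime_residue_periods (primes : List Int) (max_m : Int) : List (Int × Option (List Int)) :=
  (PySem.List.pyRange 2 (max_m + 1) 1).foldl (fun results m =>
    let seq := primes.map (fun p => PySem.Int.mod p m)
    let n : Int := seq.length
    let best :=
      (PySem.List.pyRange 1 (PySem.Int.floordiv n 3) 1).foldl (fun best period =>
        if best.isSome then best else
        (PySem.List.pyRange 0 (min 50 (n - 3 * period)) 1).foldl (fun best start =>
          if best.isSome then best else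
          let ok :=
            (PySem.List.pyRange (start + period) (min (start + 3 * period) n) 1).foldl (fun ok i =>
              if !ok then ok
              else if PySem.List.pyGet? seq i ≠ PySem.List.pyGet? seq (i - period) then false
              else ok) true
          if ok then some [period, start] else best) best) none
    results ++ [(m, best)]) []

-- ===== PORT B =====
def prime_residue_periods_alt (primes : List Int) (max_m : Int) : List (Int × Option (List Int)) :=
  let n : Int := primes.length
  (PySem.List.pyRange 2 (max_m + 1) 1).foldl (fun results m =>
    let seq := primes.map (fun p => PySem.Int.mod p m)
    let cands : List (Int × Int) :=
      (PySem.List.pyRange 0 (min 50 (n - 3)) 1).foldl (fun mins s =>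
        match (PySem.List.pyRange 1 (PySem.Int.floordiv n 3) 1).find? (fun p =>
          decide (s + 3 * p < n) &&
            ((PySem.List.pyGet? seq s == PySem.List.pyGet? seq (s + p)) &&
              (PySem.List.slice seq (some s) (some (s + 2 * p)) ==
                PySem.List.slice seq (some (s + p)) (some (s + 3 * p))))) with
        | none => mins
        | some p => mins ++ [(p, s)]) []
    -- min(cands, default=None): PySem.List.min2? gives Python's lexicographic tuple minimum
    let best := PySem.List.min2? cands (fun q => q.1) (fun q => q.2)
    results ++ [(m, best.map (fun q => [q.1, q.2]))]) []

-- ===== PRECONDITION & SPEC =====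
def Spec_prime_residue_periods (primes : List Int) (max_m : Int) (out : List (Int × Option (List Int))) : Prop := out = prime_residue_periods_alt primes max_m
instance (primes : List Int) (max_m : Int) (out : List (Int × Option (List Int))) : Decidable (Spec_prime_residue_periods primes max_m out) := by unfold Spec_prime_residue_periods; infer_instance

-- ===== CLAIM (what is proved, stated in full; the proofs are below) =====
def Claim_equal_prime_residue_periods : Prop := ∀ (primes : List Int) (max_m : Int), Dom_prime_residue_periods primes max_m → Spec_prime_residue_periods primes max_m (prime_residue_periods primes max_m)

-- ===== LEMMAS AND PROOFS =====

-- A's validity check: every element of the window repeats with period p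
def okA (seq : List Int) (p s : Int) : Bool :=
  (PySem.List.pyRange (s + p) (min (s + 3 * p) (seq.length : Int)) 1).all
    (fun i => decide (PySem.List.pyGet? seq i = PySem.List.pyGet? seq (i - p)))

-- B's validity check: slice comparison
def okB (seq : List Int) (p s : Int) : Bool :=
  decide (s + 3 * p < (seq.length : Int)) &&
    ((PySem.List.pyGet? seq s == PySem.List.pyGet? seq (s + p)) &&
      (PySem.List.slice seq (some s) (some (s + 2 * p)) ==
        PySem.List.slice seq (some (s + p)) (some (s + 3 * p))))

-- A's lexicographically ordered candidate list for a given sequence length n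
def laList (n : Int) : List (Int × Int) :=
  (PySem.List.pyRange 1 (PySem.Int.floordiv n 3) 1).flatMap
    (fun p => (PySem.List.pyRange 0 (min 50 (n - 3 * p)) 1).map (fun s => (p, s)))

-- B's start-major candidate list: for each start, its first valid period (if any)
def lbList (seq : List Int) (n : Int) : List (Int × Int) :=
  (PySem.List.pyRange 0 (min 50 (n - 3)) 1).flatMap (fun s =>
    (((PySem.List.pyRange 1 (PySem.Int.floordiv n 3) 1).find? (fun p => okB seq p s)).map
      (fun p => (p, s))).toList)

-- loop shapes ---------------------------------------------------------------

lemma foldl_break_all {P : Int → Prop} [DecidablePred P] (l : List Int) (init : Bool) :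
    l.foldl (fun ok i => if !ok then ok else if P i then false else ok) init
      = (init && l.all (fun i => !decide (P i))) := by
  induction l generalizing init with
  | nil => simp
  | cons x t ih =>
    rw [List.foldl_cons,
      show (if !init then init else if P x then false else init)
          = (init && !decide (P x)) from by cases init <;> by_cases h : P x <;> simp [h],
      ih]
    cases init <;> simp

lemma foldl_keep_some {α β : Type} (l : List α) (step : Option β → α → Option β)
    (hstep : ∀ b x, b.isSome → step b x = b) (init : Option β) (h : init.isSome) :
    l.foldl step init = init := by
  induction l with
  | nil => rfl
  | cons x t ih => rw [List.foldl_cons, hstep _ _ h]; exact ih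

lemma foldl_first_if {α β : Type} (l : List α) (g : α → Bool) (h : α → β) :
    l.foldl (fun b x => if b.isSome then b else (if g x then some (h x) else b)) none
      = (l.find? g).map h := by
  induction l with
  | nil => rfl
  | cons x t ih =>
    by_cases hg : g x
    · rw [List.foldl_cons, List.find?_cons_of_pos hg]
      simp only [Option.isSome_none, Bool.false_eq_true, if_false, hg, if_true, Option.map_some]
      exact foldl_keep_some t _ (fun b x hb => by simp [hb]) _ rfl
    · simpa [hg] using ih

lemma foldl_first_some {α β : Type} (l : List α) (F : α → Option β) :
    l.foldl (fun b x => if b.isSome then b else F x) none = l.findSome? F := by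
  induction l with
  | nil => rfl
  | cons x t ih =>
    cases hF : F x with
    | none => simpa [hF] using ih
    | some v =>
      rw [List.foldl_cons, List.findSome?_cons]
      simp only [Option.isSome_none, Bool.false_eq_true, if_false, hF]
      exact foldl_keep_some t _ (fun b x hb => by simp [hb]) _ rfl

lemma findSome?_map_find? {α β γ : Type} (l : List α) (g : α → List β) (pr : β → Bool)
    (h : β → γ) :
    l.findSome? (fun x => ((g x).find? pr).map h) = ((l.flatMap g).find? pr).map h := by
  induction l with
  | nil => rfl
  | cons x t ih =>
    simp only [List.findSome?_cons, List.flatMap_cons, List.find?_append]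
    cases hf : (g x).find? pr with
    | none => simpa [hf] using ih
    | some v => simp

-- min2? characterisation -----------------------------------------------------

def lexLe (q y : Int × Int) : Prop := q.1 < y.1 ∨ (q.1 = y.1 ∧ q.2 ≤ y.2)

def minStep (acc : Option (Int × Int)) (x : Int × Int) : Option (Int × Int) :=
  match acc with
  | none => some x
  | some m => if (decide (x.1 < m.1) || !decide (m.1 < x.1) && decide (x.2 < m.2)) = true
      then some x else some m

lemma min2?_eq_foldl_minStep (l : List (Int × Int)) :
    PySem.List.min2? l (fun q => q.1) (fun q => q.2) = l.foldl minStep none := by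
  unfold PySem.List.min2?
  congr 1
  funext acc x
  cases acc with
  | none => rfl
  | some m => rfl

lemma minStep_isSome (acc : Option (Int × Int)) (x : Int × Int) : (minStep acc x).isSome := by
  cases acc with
  | none => rfl
  | some m => unfold minStep; dsimp only; split <;> rfl

lemma foldl_minStep_isSome (l : List (Int × Int)) :
    ∀ (a : Int × Int), (l.foldl minStep (some a)).isSome := by
  induction l with
  | nil => intro a; rfl
  | cons x t ih =>
    intro a
    rw [List.foldl_cons]
    obtain ⟨b, hb⟩ := Option.isSome_iff_exists.mp (minStep_isSome (some a) x)
    rw [hb]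
    exact ih b

lemma lexLe_trans {a b c : Int × Int} (h1 : lexLe a b) (h2 : lexLe b c) : lexLe a c := by
  unfold lexLe at *; omega

lemma min2?_go_spec (l : List (Int × Int)) :
    ∀ (a q : Int × Int),
      l.foldl minStep (some a) = some q →
      (q = a ∨ q ∈ l) ∧ lexLe q a ∧ ∀ y ∈ l, lexLe q y := by
  induction l with
  | nil =>
    intro a q h
    simp only [List.foldl_nil, Option.some.injEq] at h
    subst h
    exact ⟨Or.inl rfl, Or.inr ⟨rfl, le_refl _⟩, by simp⟩
  | cons x t ih =>
    intro a q h
    rw [List.foldl_cons] at h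
    by_cases hc : (decide (x.1 < a.1) || !decide (a.1 < x.1) && decide (x.2 < a.2)) = true
    · rw [show minStep (some a) x = some x from by unfold minStep; simp [hc]] at h
      obtain ⟨hmem, hqx, hall⟩ := ih x q h
      have hxa : lexLe x a := by unfold lexLe; simp at hc; omega
      refine ⟨?_, lexLe_trans hqx hxa, ?_⟩
      · rcases hmem with h1 | h1
        · exact Or.inr (by simp [h1])
        · exact Or.inr (List.mem_cons_of_mem _ h1)
      · intro y hy
        rcases List.mem_cons.mp hy with rfl | hy
        · exact hqx
        · exact hall y hy
    · rw [show minStep (some a) x = some a from by unfold minStep; simp [hc]] at h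
      obtain ⟨hmem, hqa, hall⟩ := ih a q h
      have hax : lexLe a x := by unfold lexLe; simp at hc; omega
      refine ⟨?_, hqa, ?_⟩
      · rcases hmem with h1 | h1
        · exact Or.inl h1
        · exact Or.inr (List.mem_cons_of_mem _ h1)
      · intro y hy
        rcases List.mem_cons.mp hy with rfl | hy
        · exact lexLe_trans hqa hax
        · exact hall y hy

lemma min2?_none_iff (l : List (Int × Int)) :
    PySem.List.min2? l (fun q => q.1) (fun q => q.2) = none ↔ l = [] := by
  rw [min2?_eq_foldl_minStep]
  cases l with
  | nil => simp
  | cons x t =>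
    rw [List.foldl_cons, show minStep none x = some x from rfl]
    constructor
    · intro h
      have := foldl_minStep_isSome t x
      rw [h] at this
      exact absurd this (by simp)
    · intro h; exact absurd h (List.cons_ne_nil _ _)

lemma min2?_spec (l : List (Int × Int)) (q : Int × Int)
    (h : PySem.List.min2? l (fun q => q.1) (fun q => q.2) = some q) :
    q ∈ l ∧ ∀ y ∈ l, lexLe q y := by
  rw [min2?_eq_foldl_minStep] at h
  cases l with
  | nil => simp at h
  | cons x t =>
    rw [List.foldl_cons, show minStep none x = some x from rfl] at h
    obtain ⟨hmem, hqx, hall⟩ := min2?_go_spec t x q h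
    refine ⟨?_, ?_⟩
    · rcases hmem with h1 | h1
      · exact h1 ▸ List.mem_cons_self
      · exact List.mem_cons_of_mem _ h1
    · intro y hy
      rcases List.mem_cons.mp hy with rfl | hy
      · exact hqx
      · exact hall y hy

-- sortedness and head of A's list -------------------------------------------

def lexLt (q y : Int × Int) : Prop := q.1 < y.1 ∨ (q.1 = y.1 ∧ q.2 < y.2)

lemma laList_pairwise (n : Int) : (laList n).Pairwise lexLt := by
  unfold laList
  rw [List.flatMap_def, List.pairwise_flatten]
  constructor
  · intro l hl
    rw [List.mem_map] at hl
    obtain ⟨p, _, rfl⟩ := hl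
    rw [List.pairwise_map]
    refine (PySem.List.pairwise_lt_pyRange_one _ _).imp ?_
    intro s1 s2 h12
    exact Or.inr ⟨rfl, h12⟩
  · rw [List.pairwise_map]
    refine (PySem.List.pairwise_lt_pyRange_one _ _).imp ?_
    intro p1 p2 h12 x hx y hy
    rw [List.mem_map] at hx hy
    obtain ⟨s1, _, rfl⟩ := hx
    obtain ⟨s2, _, rfl⟩ := hy
    exact Or.inl h12

lemma find?_sorted_spec (L : List (Int × Int)) (pr : (Int × Int) → Bool)
    (hs : L.Pairwise lexLt) (q : Int × Int) (h : L.find? pr = some q) :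
    (q ∈ L ∧ pr q) ∧ ∀ y ∈ L, pr y → lexLe q y := by
  refine ⟨⟨List.mem_of_find?_eq_some h, List.find?_some h⟩, ?_⟩
  intro y hy hpy
  have hyf : y ∈ L.filter pr := List.mem_filter.mpr ⟨hy, hpy⟩
  have hhead : (L.filter pr).head? = some q := by rw [List.head?_filter, h]
  have hpw : (L.filter pr).Pairwise lexLt := hs.filter pr
  cases hf : L.filter pr with
  | nil => rw [hf] at hyf; simp at hyf
  | cons a rest =>
    rw [hf] at hhead hyf hpw
    have ha : a = q := by simpa using hhead
    subst ha
    rcases List.mem_cons.mp hyf with rfl | hyr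
    · unfold lexLe; omega
    · have hlt := List.rel_of_pairwise_cons hpw hyr
      unfold lexLt at hlt; unfold lexLe; omega

-- okA ↔ okB under the bounds -------------------------------------------------

lemma okA_iff_okB (seq : List Int) (p s : Int) (hp : 1 ≤ p) (hs : 0 ≤ s)
    (hb : s + 3 * p < (seq.length : Int)) :
    okA seq p s = okB seq p s := by
  obtain ⟨P, rfl⟩ : ∃ P : Nat, p = (P : Int) := ⟨p.toNat, (Int.toNat_of_nonneg (by omega)).symm⟩
  obtain ⟨S, rfl⟩ : ∃ S : Nat, s = (S : Int) := ⟨s.toNat, (Int.toNat_of_nonneg hs).symm⟩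
  unfold okA okB
  rw [min_eq_left (le_of_lt hb)]
  have hsl1 : PySem.List.slice seq (some (S : Int)) (some ((S : Int) + 2 * (P : Int)))
      = (seq.drop S).take (2 * P) := by
    rw [show (S : Int) + 2 * (P : Int) = (S : Int) + ((2 * P : Nat) : Int) by push_cast; ring]
    exact PySem.List.slice_natCast_add seq S (2 * P)
  have hsl2 : PySem.List.slice seq (some ((S : Int) + (P : Int))) (some ((S : Int) + 3 * (P : Int)))
      = (seq.drop (S + P)).take (2 * P) := by
    rw [show (S : Int) + (P : Int) = ((S + P : Nat) : Int) by push_cast; ring,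
        show (S : Int) + 3 * (P : Int) = ((S + P : Nat) : Int) + ((2 * P : Nat) : Int) by push_cast; ring]
    exact PySem.List.slice_natCast_add seq (S + P) (2 * P)
  rw [hsl1, hsl2, Bool.eq_iff_iff]
  simp only [Bool.and_eq_true, decide_eq_true_eq, beq_iff_eq, List.all_eq_true,
    PySem.List.mem_pyRange_one]
  constructor
  · intro h
    refine ⟨hb, ?_, List.ext_getElem? ?_⟩
    · have h0 := h ((S : Int) + (P : Int)) ⟨by omega, by push_cast; omega⟩
      rw [show (S : Int) + (P : Int) - (P : Int) = (S : Int) by ring] at h0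
      exact h0.symm
    intro k
    rw [List.getElem?_take, List.getElem?_take, List.getElem?_drop, List.getElem?_drop]
    by_cases hk : k < 2 * P
    · simp only [hk, if_true]
      have hi := h ((S : Int) + (P : Int) + (k : Int))
        ⟨by omega, by omega⟩
      rw [show (S : Int) + (P : Int) + (k : Int) = ((S + P + k : Nat) : Int) by push_cast; ring]
        at hi
      rw [show ((S + P + k : Nat) : Int) - (P : Int) = ((S + k : Nat) : Int) by push_cast; ring]
        at hi
      rw [PySem.List.pyGet?_natCast, PySem.List.pyGet?_natCast] at hi
      exact hi.symm
    · simp [hk]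
  · rintro ⟨-, -, heq⟩ i ⟨hi1, hi2⟩
    obtain ⟨k, hk, rfl⟩ : ∃ k : Nat, k < 2 * P ∧ i = ((S + P + k : Nat) : Int) :=
      ⟨(i - ((S : Int) + (P : Int))).toNat, by omega, by push_cast; omega⟩
    have h1 := congrArg (fun l => l[k]?) heq
    simp only [List.getElem?_take, List.getElem?_drop, hk, if_true] at h1
    rw [show ((S + P + k : Nat) : Int) - (P : Int) = ((S + k : Nat) : Int) by push_cast; ring]
    rw [PySem.List.pyGet?_natCast, PySem.List.pyGet?_natCast]
    exact h1.symm

-- membership -----------------------------------------------------------------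

lemma mem_laList_iff (n : Int) (q : Int × Int) :
    q ∈ laList n ↔
      (1 ≤ q.1 ∧ q.1 < PySem.Int.floordiv n 3 ∧ 0 ≤ q.2 ∧ q.2 < min 50 (n - 3 * q.1)) := by
  unfold laList
  simp only [List.mem_flatMap, List.mem_map, PySem.List.mem_pyRange_one]
  constructor
  · rintro ⟨p, hp, s, hs, rfl⟩
    exact ⟨hp.1, hp.2, hs.1, hs.2⟩
  · rintro ⟨h1, h2, h3, h4⟩
    exact ⟨q.1, ⟨h1, h2⟩, q.2, ⟨h3, h4⟩, rfl⟩

lemma mem_lbList_iff (seq : List Int) (n : Int) (q : Int × Int) :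
    q ∈ lbList seq n ↔
      (0 ≤ q.2 ∧ q.2 < min 50 (n - 3) ∧
        (PySem.List.pyRange 1 (PySem.Int.floordiv n 3) 1).find? (fun p => okB seq p q.2)
          = some q.1) := by
  unfold lbList
  simp only [List.mem_flatMap, PySem.List.mem_pyRange_one]
  constructor
  · rintro ⟨s, hs, hq⟩
    cases hf : (PySem.List.pyRange 1 (PySem.Int.floordiv n 3) 1).find? (fun p => okB seq p s) with
    | none => rw [hf] at hq; simp at hq
    | some p =>
      rw [hf] at hq
      simp only [Option.map_some, Option.toList_some, List.mem_singleton] at hq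
      subst hq
      exact ⟨hs.1, hs.2, hf⟩
  · rintro ⟨h1, h2, h3⟩
    refine ⟨q.2, ⟨h1, h2⟩, ?_⟩
    rw [h3]
    simp

-- first satisfier of a predicate on a strictly increasing list is ≤ any satisfier
lemma find?_first_le (l : List Int) (pred : Int → Bool) (hl : l.Pairwise (· < ·))
    (x : Int) (hx : x ∈ l) (hp : pred x = true) :
    ∃ y, l.find? pred = some y ∧ y ≤ x := by
  cases hf : l.find? pred with
  | none => exact absurd hp (by simpa using List.find?_eq_none.mp hf x hx)
  | some y =>
    refine ⟨y, rfl, ?_⟩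
    have hhead : (l.filter pred).head? = some y := by rw [List.head?_filter, hf]
    have hxf : x ∈ l.filter pred := List.mem_filter.mpr ⟨hx, hp⟩
    have hpw := hl.filter pred
    cases hfl : l.filter pred with
    | nil => rw [hfl] at hxf; simp at hxf
    | cons a rest =>
      rw [hfl] at hhead hxf hpw
      have ha : a = y := by simpa using hhead
      subst ha
      rcases List.mem_cons.mp hxf with rfl | hxr
      · exact le_refl _
      · exact le_of_lt (List.rel_of_pairwise_cons hpw hxr)

lemma okB_bound (seq : List Int) (p s : Int) (h : okB seq p s = true) :
    s + 3 * p < (seq.length : Int) := by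
  unfold okB at h
  rw [Bool.and_eq_true] at h
  exact of_decide_eq_true h.1

-- every B-candidate is a valid A-candidate
lemma lb_sound (seq : List Int) (q : Int × Int) (hq : q ∈ lbList seq (seq.length : Int)) :
    q ∈ laList (seq.length : Int) ∧ okA seq q.1 q.2 = true := by
  rw [mem_lbList_iff] at hq
  obtain ⟨h1, h2, hf⟩ := hq
  have hmem := List.mem_of_find?_eq_some hf
  rw [PySem.List.mem_pyRange_one] at hmem
  have hok : okB seq q.1 q.2 = true := by have := List.find?_some hf; simpa using this
  have hb : q.2 + 3 * q.1 < (seq.length : Int) := okB_bound seq q.1 q.2 hok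
  rw [mem_laList_iff]
  refine ⟨⟨hmem.1, hmem.2, h1, by omega⟩, ?_⟩
  rw [okA_iff_okB seq q.1 q.2 hmem.1 h1 hb]
  exact hok

-- every valid A-candidate is lex-dominated by a B-candidate with the same start
lemma lb_complete (seq : List Int) (q : Int × Int) (hq : q ∈ laList (seq.length : Int))
    (hok : okA seq q.1 q.2 = true) :
    ∃ p', p' ≤ q.1 ∧ (p', q.2) ∈ lbList seq (seq.length : Int) := by
  rw [mem_laList_iff] at hq
  obtain ⟨h1, h2, h3, h4⟩ := hq
  have hb : q.2 + 3 * q.1 < (seq.length : Int) := by omega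
  have hokB : okB seq q.1 q.2 = true := by
    rw [← okA_iff_okB seq q.1 q.2 h1 h3 hb]; exact hok
  obtain ⟨p', hf, hle⟩ := find?_first_le _ (fun p => okB seq p q.2)
    (PySem.List.pairwise_lt_pyRange_one _ _) q.1
    (by rw [PySem.List.mem_pyRange_one]; exact ⟨h1, h2⟩) hokB
  refine ⟨p', hle, ?_⟩
  rw [mem_lbList_iff]
  exact ⟨h3, by omega, hf⟩

-- per-m equality --------------------------------------------------------------

lemma find?_eq_min2? (seq : List Int) :
    ((laList (seq.length : Int)).find? (fun q => okA seq q.1 q.2)) =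
      PySem.List.min2? (lbList seq (seq.length : Int)) (fun q => q.1) (fun q => q.2) := by
  cases hf : (laList (seq.length : Int)).find? (fun q => okA seq q.1 q.2) with
  | none =>
    have hnone := List.find?_eq_none.mp hf
    have hnil : lbList seq (seq.length : Int) = [] := by
      rw [List.eq_nil_iff_forall_not_mem]
      intro q hq
      have hh := lb_sound seq q hq
      exact hnone q hh.1 hh.2
    rw [hnil, (min2?_none_iff []).mpr rfl]
  | some q =>
    obtain ⟨⟨hqL, hqok⟩, hmin⟩ := find?_sorted_spec _ _ (laList_pairwise _) q hf
    cases hm : PySem.List.min2? (lbList seq (seq.length : Int)) (fun q => q.1) (fun q => q.2) with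
    | none =>
      obtain ⟨p', -, hp'mem⟩ := lb_complete seq q hqL hqok
      rw [(min2?_none_iff _).mp hm] at hp'mem
      simp at hp'mem
    | some q' =>
      obtain ⟨hq'B, hq'min⟩ := min2?_spec _ q' hm
      obtain ⟨hq'L, hq'ok⟩ := lb_sound seq q' hq'B
      have h1 : lexLe q q' := hmin q' hq'L hq'ok
      obtain ⟨p', hp'le, hp'mem⟩ := lb_complete seq q hqL hqok
      have h2 : lexLe q' (p', q.2) := hq'min _ hp'mem
      unfold lexLe at h1 h2
      have : q.1 = q'.1 ∧ q.2 = q'.2 := by simp only at h2; omega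
      rw [show q = q' from Prod.ext this.1 this.2]

lemma foldl_guard_congr {α β : Type} (l : List α) (S : α → Option β → Option β) :
    l.foldl (fun b x => if b.isSome then b else S x b) none
      = l.foldl (fun b x => if b.isSome then b else S x none) none := by
  suffices h : ∀ init : Option β,
      l.foldl (fun b x => if b.isSome then b else S x b) init
        = l.foldl (fun b x => if b.isSome then b else S x none) init from h none
  induction l with
  | nil => intro init; rfl
  | cons x t ih =>
    intro init
    cases init with
    | some v =>
      rw [List.foldl_cons, List.foldl_cons]
      simp only [Option.isSome_some, if_true]
      rw [foldl_keep_some t _ (fun b x hb => by simp [hb]) (some v) rfl,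
        foldl_keep_some t _ (fun b x hb => by simp [hb]) (some v) rfl]
    | none => simpa using ih (S x none)

-- A's per-m triple loop computes the first valid pair of the lex-ordered candidate list
lemma bestA_eq (seq : List Int) :
    ((PySem.List.pyRange 1 (PySem.Int.floordiv (seq.length : Int) 3) 1).foldl (fun best period =>
      if best.isSome then best else
      (PySem.List.pyRange 0 (min 50 ((seq.length : Int) - 3 * period)) 1).foldl (fun best start =>
        if best.isSome then best else
        let ok := (PySem.List.pyRange (start + period) (min (start + 3 * period) (seq.length : Int)) 1).foldl
          (fun ok i => if !ok then ok
            else if PySem.List.pyGet? seq i ≠ PySem.List.pyGet? seq (i - period) then false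
            else ok) true
        if ok then some [period, start] else best) best) none)
    = ((laList (seq.length : Int)).find? (fun q => okA seq q.1 q.2)).map (fun q => [q.1, q.2]) := by
  rw [foldl_guard_congr]
  simp only [foldl_break_all, Bool.true_and, decide_not, Bool.not_not]
  simp only [foldl_first_if]
  rw [foldl_first_some]
  unfold laList
  rw [← findSome?_map_find?]
  congr 1
  funext period
  rw [List.find?_map, Option.map_map]
  rfl

-- B's per-m candidate loop builds lbList
lemma bestB_eq (seq : List Int) :
    ((PySem.List.pyRange 0 (min 50 ((seq.length : Int) - 3)) 1).foldl (fun mins s =>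
        match (PySem.List.pyRange 1 (PySem.Int.floordiv (seq.length : Int) 3) 1).find? (fun p =>
          decide (s + 3 * p < (seq.length : Int)) &&
            ((PySem.List.pyGet? seq s == PySem.List.pyGet? seq (s + p)) &&
              (PySem.List.slice seq (some s) (some (s + 2 * p)) ==
                PySem.List.slice seq (some (s + p)) (some (s + 3 * p))))) with
        | none => mins
        | some p => mins ++ [(p, s)]) [])
      = lbList seq (seq.length : Int) := by
  show ((PySem.List.pyRange 0 (min 50 ((seq.length : Int) - 3)) 1).foldl (fun mins s =>
      match (PySem.List.pyRange 1 (PySem.Int.floordiv (seq.length : Int) 3) 1).find?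
          (fun p => okB seq p s) with
      | none => mins
      | some p => mins ++ [(p, s)]) [])
    = lbList seq (seq.length : Int)
  have h1 : ((PySem.List.pyRange 0 (min 50 ((seq.length : Int) - 3)) 1).foldl (fun mins s =>
      match (PySem.List.pyRange 1 (PySem.Int.floordiv (seq.length : Int) 3) 1).find?
          (fun p => okB seq p s) with
      | none => mins
      | some p => mins ++ [(p, s)]) [])
    = ((PySem.List.pyRange 0 (min 50 ((seq.length : Int) - 3)) 1).foldl (fun mins s =>
      mins ++ ((((PySem.List.pyRange 1 (PySem.Int.floordiv (seq.length : Int) 3) 1).find?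
        (fun p => okB seq p s)).map (fun p => (p, s))).toList)) []) :=
    by
      apply PySem.List.foldl_congr_mem
      intro acc s _
      cases hf : (PySem.List.pyRange 1 (PySem.Int.floordiv (seq.length : Int) 3) 1).find?
          (fun p => okB seq p s) <;> simp [hf]
  rw [h1, PySem.List.foldl_append_eq_flatMap, List.nil_append]
  rfl

-- ===== VERDICT (by name: the statement is the Claim_ definition above) =====
theorem prime_residue_periods_spec : Claim_equal_prime_residue_periods := by
  unfold Claim_equal_prime_residue_periods Spec_prime_residue_periods
  intro primes max_m _
  simp only [prime_residue_periods, prime_residue_periods_alt,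
    PySem.List.foldl_append_singleton_eq_map, List.nil_append]
  refine List.map_congr_left ?_
  intro m hm
  have hlen : (primes.length : Int)
      = ((primes.map (fun p => PySem.Int.mod p m)).length : Int) := by simp
  rw [hlen]
  congr 1
  rw [bestA_eq, find?_eq_min2?, ← bestB_eq]
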